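-- pv_equiv track=rewrite | github.com/pypi-data/pypi-mirror-374 | packages/picopyn/picopyn-0.1.1.tar.gz/picopyn-0.1.1/benchmark/bench.py | build_batch_insert_sql
-- ===== SOURCE A (Python) =====
-- def build_batch_insert_sql(batch_size: int) -> str:
--     """
--     Generate parameterized SQL insert statement for batch insert.
--
--     Args:
--         batch_size (int): Number of rows in one batch.
--
--     Returns:
--         str: SQL INSERT query string.
--     """
--     value_groups = []
--     for i in range(batch_size):
--         base = i * 10
--         placeholders = [f"${base + j + 1}" for j in range(10)]
--         value_groups.append(f"({', '.join(placeholders)})")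
--     return (
--         "INSERT INTO test_all_types ("
--         "id, int_field, unsigned_field, double_field, numeric_field, "
--         "text_field, varchar_field, bool_field, date_field, uuid_field"
--         ") VALUES " + ", ".join(value_groups)
--     )
-- ===== SOURCE B (Python) =====
-- def build_batch_insert_sql(batch_size: int) -> str:
--     """Flat placeholder list regrouped in chunks of 10 (structural alternative)."""
--     placeholders = [f"${k}" for k in range(1, batch_size * 10 + 1)]
--     groups = [
--         "(" + ", ".join(placeholders[s:s + 10]) + ")"
--         for s in range(0, batch_size * 10, 10)
--     ]
--     return (
--         "INSERT INTO test_all_types ("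
--         "id, int_field, unsigned_field, double_field, numeric_field, "
--         "text_field, varchar_field, bool_field, date_field, uuid_field"
--         ") VALUES " + ", ".join(groups)
--     )
-- ===== Notes on version B (the rewrite author's own statement) =====
-- stated objective: alternative
-- what changed: Replaces the nested per-row loop with its per-row base arithmetic by generating one flat list of all placeholders sequentially and then regrouping it into rows via a step-ten range and slicing.
import Mathlib
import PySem

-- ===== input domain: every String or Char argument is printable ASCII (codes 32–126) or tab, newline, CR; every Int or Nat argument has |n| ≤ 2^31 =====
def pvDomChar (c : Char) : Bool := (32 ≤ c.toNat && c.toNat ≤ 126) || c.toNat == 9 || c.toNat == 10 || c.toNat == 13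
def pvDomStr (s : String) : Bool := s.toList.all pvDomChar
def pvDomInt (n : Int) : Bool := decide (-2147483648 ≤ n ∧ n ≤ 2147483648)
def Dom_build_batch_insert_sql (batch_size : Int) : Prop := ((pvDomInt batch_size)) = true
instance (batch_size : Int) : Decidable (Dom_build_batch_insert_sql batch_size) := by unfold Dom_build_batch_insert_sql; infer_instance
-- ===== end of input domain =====

-- B builds one flat list of placeholders $1..$10n and regroups it into chunks of 10 (alternative decomposition, same cost).


-- ===== PORT A =====
def build_batch_insert_sql (batch_size : Int) : String :=
  let value_groups := (PySem.List.pyRange 0 batch_size 1).foldl (fun acc i =>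
    let base := i * 10
    let placeholders := (PySem.List.pyRange 0 10 1).map (fun j => "$" ++ PySem.Int.toStr (base + j + 1))
    acc ++ ["(" ++ PySem.Str.join ", " placeholders ++ ")"]) []
  "INSERT INTO test_all_types (id, int_field, unsigned_field, double_field, numeric_field, text_field, varchar_field, bool_field, date_field, uuid_field) VALUES "
    ++ PySem.Str.join ", " value_groups

-- ===== PORT B =====
def build_batch_insert_sql_alt (batch_size : Int) : String :=
  let placeholders := (PySem.List.pyRange 1 (batch_size * 10 + 1) 1).map (fun k => "$" ++ PySem.Int.toStr k)
  let groups := (PySem.List.pyRange 0 (batch_size * 10) 10).map (fun s =>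
    "(" ++ PySem.Str.join ", " (PySem.List.slice placeholders (some s) (some (s + 10))) ++ ")")
  "INSERT INTO test_all_types (id, int_field, unsigned_field, double_field, numeric_field, text_field, varchar_field, bool_field, date_field, uuid_field) VALUES "
    ++ PySem.Str.join ", " groups

-- ===== PRECONDITION & SPEC =====
def Spec_build_batch_insert_sql (batch_size : Int) (out : String) : Prop := out = build_batch_insert_sql_alt batch_size
instance (batch_size : Int) (out : String) : Decidable (Spec_build_batch_insert_sql batch_size out) := by unfold Spec_build_batch_insert_sql; infer_instance

-- ===== CLAIM (what is proved, stated in full; the proofs are below) =====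
def Claim_equal_build_batch_insert_sql : Prop := ∀ (batch_size : Int), Dom_build_batch_insert_sql batch_size → Spec_build_batch_insert_sql batch_size (build_batch_insert_sql batch_size)

-- ===== LEMMAS AND PROOFS =====

theorem inner_eq (n k : Nat) (hk : k < n) :
    (PySem.List.pyRange 0 10 1).map (fun j => "$" ++ PySem.Int.toStr ((k:Int) * 10 + j + 1)) =
    PySem.List.slice
      ((PySem.List.pyRange 1 ((n:Int) * 10 + 1) 1).map (fun x => "$" ++ PySem.Int.toStr x))
      (some ((10:Int) * (k:Int))) (some ((10:Int) * (k:Int) + 10)) := by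
  have h1 : ((10:Int) * (k:Int)) = ((10*k : Nat) : Int) := by push_cast; ring
  rw [h1]
  have h2 : (((10*k:Nat)) : Int) + 10 = (((10*k:Nat)) : Int) + ((10:Nat) : Int) := by norm_num
  rw [h2, PySem.List.slice_natCast_add]
  rw [PySem.List.pyRange_one 1 ((n:Int)*10+1), PySem.List.pyRange_one 0 10]
  simp only [← List.map_drop, ← List.map_take]
  have hr : ((10:Int) - 0).toNat = 10 := by decide
  have hr2 : ((n:Int)*10 + 1 - 1).toNat = 10 * n := by omega
  rw [hr, hr2]
  have hd : (List.range (10*n)).drop (10*k) = List.range' (10*k) (10*n - 10*k) := by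
    simp [List.range_eq_range', List.drop_range']
  rw [hd, List.range'_eq_map_range]
  rw [← List.map_take, List.take_range]
  have hmin : min 10 (10*n - 10*k) = 10 := by omega
  rw [hmin]
  simp only [List.map_map]
  apply List.map_congr_left
  intro j hj
  simp only [Function.comp]
  congr 2
  push_cast
  ring

theorem groups_eq (batch_size : Int) :
    (PySem.List.pyRange 0 batch_size 1).map (fun i =>
      "(" ++ PySem.Str.join ", " ((PySem.List.pyRange 0 10 1).map (fun j => "$" ++ PySem.Int.toStr (i * 10 + j + 1))) ++ ")") =
    (PySem.List.pyRange 0 (batch_size * 10) 10).map (fun s =>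
      "(" ++ PySem.Str.join ", " (PySem.List.slice
        ((PySem.List.pyRange 1 (batch_size * 10 + 1) 1).map (fun k => "$" ++ PySem.Int.toStr k))
        (some s) (some (s + 10))) ++ ")") := by
  by_cases h : batch_size ≤ 0
  · rw [PySem.List.pyRange_one_eq_nil h, PySem.List.pyRange_of_pos 0 (batch_size*10) (s := 10) (by norm_num)]
    rw [if_neg (by omega)]
    simp
  · obtain ⟨n, rfl⟩ : ∃ n : Nat, batch_size = (n : Int) := ⟨batch_size.toNat, by omega⟩
    rw [PySem.List.pyRange_one 0 (n:Int), PySem.List.pyRange_of_pos 0 ((n:Int)*10) (s := 10) (by norm_num)]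
    rw [if_pos (by omega)]
    have hcnt : (((n:Int) * 10 - 0 + 10 - 1) / 10).toNat = n := by omega
    rw [hcnt]
    have hc2 : ((n:Int) - 0).toNat = n := by omega
    rw [hc2]
    simp only [List.map_map]
    apply List.map_congr_left
    intro k hk
    simp only [Function.comp, zero_add]
    rw [inner_eq n k (by simpa using hk)]

-- ===== VERDICT (by name: the statement is the Claim_ definition above) =====
theorem build_batch_insert_sql_spec : Claim_equal_build_batch_insert_sql := by
  intro bs _
  unfold Spec_build_batch_insert_sql build_batch_insert_sql build_batch_insert_sql_alt
  rw [PySem.List.foldl_append_singleton_eq_map, List.nil_append, groups_eq]
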